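-- pv_equiv track=rewrite | github.com/VirtualEmbryo/delaunay-watershed | src/dw3d/mesh_surgery.py | _evaluate_cycle
-- ===== SOURCE A (Python) =====
-- def _evaluate_cycle(label_cycle: list[int]) -> int:
--     """The higher the better. Try to balance labels in a cycle and avoid at all cost having only one label.
--
--     The balance is achieved by computing the minimum of consecutives labels. We want to maximize this minimum.
--     """
--     # we avoid solutions that lead to deletion of edge by giving a bad evaluation if all labels are the same
--     if all(x == label_cycle[0] for x in label_cycle):
--         return 0
--
--     label_cycle = label_cycle.copy()
--     # Here not all values are the same.
--     # We cycle until the first element is different from the last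
--     while label_cycle[0] == label_cycle[-1]:
--         label_cycle.append(label_cycle[0])
--         del label_cycle[0]
--
--     # count differences now
--     size = len(label_cycle)
--     current = label_cycle[0]
--     current_consecutives = 1
--     min_consecutives = size
--     for i in range(1, size):  # there is at least two (different) elements
--         if label_cycle[i] == current:
--             current_consecutives += 1
--         else:
--             if min_consecutives > current_consecutives:
--                 min_consecutives = current_consecutives
--             current_consecutives = 1
--             current = label_cycle[i]
--     if min_consecutives > current_consecutives:
--         min_consecutives = current_consecutives
--
--     return min_consecutives
-- ===== SOURCE B (Python) =====
-- def _evaluate_cycle(label_cycle: list[int]) -> int: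
--     n = len(label_cycle)
--     # length of the leading run (elements equal to the first one)
--     lead = 0
--     while lead < n and label_cycle[lead] == label_cycle[0]:
--         lead += 1
--     if lead == n:
--         return 0  # all labels equal (or empty cycle)
--     # single pass over the remainder: run lengths by comparing with the previous element
--     m = n
--     cur = 1
--     for i in range(lead + 1, n):
--         if label_cycle[i] == label_cycle[i - 1]:
--             cur += 1
--         else:
--             m = min(m, cur)
--             cur = 1
--     # wrap-around: the last run merges with the leading run iff their labels match
--     if label_cycle[-1] == label_cycle[0]:
--         m = min(m, cur + lead)
--     else:
--         m = min(m, cur, lead)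
--     return m
-- ===== Notes on version B (the rewrite author's own statement) =====
-- stated objective: alternative
-- what changed: A physically rotates the list (append head, delete head) until first != last and then scans the rotated copy; B never rotates: it measures the leading run, scans the rest once comparing each element to its predecessor, and merges the wrap-around run arithmetically.
import Mathlib
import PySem

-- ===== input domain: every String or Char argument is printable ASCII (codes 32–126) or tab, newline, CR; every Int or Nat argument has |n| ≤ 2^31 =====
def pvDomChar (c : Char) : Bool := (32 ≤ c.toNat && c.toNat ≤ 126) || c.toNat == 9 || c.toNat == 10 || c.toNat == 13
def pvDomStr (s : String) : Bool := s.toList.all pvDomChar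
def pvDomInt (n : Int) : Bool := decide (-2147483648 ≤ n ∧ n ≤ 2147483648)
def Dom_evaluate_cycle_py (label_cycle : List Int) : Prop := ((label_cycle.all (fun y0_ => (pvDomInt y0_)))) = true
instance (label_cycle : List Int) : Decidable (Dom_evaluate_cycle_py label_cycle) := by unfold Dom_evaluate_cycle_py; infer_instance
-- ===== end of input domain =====

-- B replaces A's rotate-the-list-until-first≠last surgery by one direct pass over the original
-- list with an arithmetic wrap-around merge of the last run into the leading run.

-- ===== PORT A =====
-- `all(x == label_cycle[0] for x in label_cycle)`: True on [], else compares every element to the head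
def allEqA (l : List Int) : Bool :=
  match l with
  | [] => true
  | x :: _ => l.all (fun y => y == x)

-- the body of A's counting for-loop, as a fold step over (current, current_consecutives, min_consecutives)
def astep : Int × Int × Int → Int → Int × Int × Int
  | (current, cc, mc), y =>
    if y == current then (current, cc + 1, mc)
    else (y, 1, if mc > cc then cc else mc)

-- the while-loop `while label_cycle[0] == label_cycle[-1]: append head; del head`, with fuel;
-- the caller passes fuel = length, which suffices (proved below: the loop moves exactly the
-- leading run to the back), so the fuel only makes the same computation total
def rotA : Nat → List Int → List Int
  | 0, l => l
  | k + 1, l =>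
    match l with
    | [] => []
    | x :: xs =>
      if (x :: xs).getLastD 0 == x then rotA k (xs ++ [x]) else x :: xs

def evaluate_cycle_py (label_cycle : List Int) : Int :=
  if allEqA label_cycle then 0
  else
    let c := rotA label_cycle.length label_cycle
    -- c is nonempty here, so headD 0 is exactly c[0]
    let s := c.tail.foldl astep (c.headD 0, 1, (c.length : Int))
    if s.2.2 > s.2.1 then s.2.1 else s.2.2

-- ===== PORT B =====
-- B's leading-run while loop: count leading elements equal to the first one
def leadB (x0 : Int) : List Int → Nat
  | [] => 0
  | y :: ys => if y == x0 then leadB x0 ys + 1 else 0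

-- B's for-loop body over (previous element, cur, m)
def bstep : Int × Int × Int → Int → Int × Int × Int
  | (prev, cur, m), y =>
    if y == prev then (y, cur + 1, m) else (y, 1, min m cur)

def evaluate_cycle_py_alt (label_cycle : List Int) : Int :=
  let n := label_cycle.length
  let lead := leadB (label_cycle.headD 0) label_cycle
  if lead = n then 0
  else
    -- indices 0, lead, i, i-1 (lead+1 ≤ i < n) and -1 are in range here, so headD/getD/getLastD are exact
    let s := (label_cycle.drop (lead + 1)).foldl bstep (label_cycle.getD lead 0, 1, (n : Int))
    if label_cycle.getLastD 0 == label_cycle.headD 0 then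
      min s.2.2 (s.2.1 + (lead : Int))
    else
      min (min s.2.2 s.2.1) (lead : Int)

-- ===== PRECONDITION & SPEC =====
def Spec_evaluate_cycle_py (label_cycle : List Int) (out : Int) : Prop := out = evaluate_cycle_py_alt label_cycle
instance (label_cycle : List Int) (out : Int) : Decidable (Spec_evaluate_cycle_py label_cycle out) := by unfold Spec_evaluate_cycle_py; infer_instance

-- ===== CLAIM (what is proved, stated in full; the proofs are below) =====
def Claim_equal_evaluate_cycle_py : Prop := ∀ (label_cycle : List Int), Dom_evaluate_cycle_py label_cycle → Spec_evaluate_cycle_py label_cycle (evaluate_cycle_py label_cycle)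

-- ===== LEMMAS AND PROOFS =====

theorem astep_eq_bstep : astep = bstep := by
  funext s y
  obtain ⟨c, a, b⟩ := s
  simp only [astep, bstep]
  by_cases h : (y == c) = true
  · have hy : y = c := by simpa using h
    subst hy
    rw [if_pos h, if_pos h]
  · rw [if_neg h, if_neg h]
    simp only [Prod.mk.injEq]
    refine ⟨trivial, trivial, ?_⟩
    split <;> omega

theorem leadB_le (x : Int) (l : List Int) : leadB x l ≤ l.length := by
  induction l with
  | nil => simp [leadB]
  | cons y ys ih => simp only [leadB, List.length_cons]; split <;> omega

theorem take_leadB (x : Int) (l : List Int) :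
    l.take (leadB x l) = List.replicate (leadB x l) x := by
  induction l with
  | nil => simp [leadB]
  | cons y ys ih =>
    simp only [leadB]
    split
    · next h => simp only [beq_iff_eq] at h; subst h; simp [List.replicate_succ, ih]
    · simp

theorem drop_leadB (x : Int) (l : List Int) :
    l.drop (leadB x l) = [] ∨ ∃ r rt, l.drop (leadB x l) = r :: rt ∧ r ≠ x := by
  induction l with
  | nil => left; simp [leadB]
  | cons y ys ih =>
    simp only [leadB]
    split
    · next h => simpa using ih
    · next h => right; exact ⟨y, ys, rfl, by simpa using h⟩

theorem leadB_eq_length_iff (x : Int) (l : List Int) :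
    leadB x l = l.length ↔ ∀ y ∈ l, y = x := by
  induction l with
  | nil => simp [leadB]
  | cons y ys ih =>
    simp only [leadB, List.length_cons, List.mem_cons]
    by_cases h : y = x
    · subst h
      simp only [BEq.rfl, if_true]
      constructor
      · intro hh z hz
        rcases hz with rfl | hz
        · rfl
        · exact ih.mp (by omega) z hz
      · intro hh
        have := ih.mpr (fun z hz => hh z (Or.inr hz))
        omega
    · rw [if_neg (by simpa using h)]
      constructor
      · intro hh; exact absurd hh (by omega)
      · intro hh; exact absurd (hh y (Or.inl rfl)) h

-- folding the counting step over k copies of the current label just adds k to the counter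
theorem foldl_astep_replicate (x : Int) (k : Nat) (a b : Int) :
    (List.replicate k x).foldl astep (x, a, b) = (x, a + (k : Int), b) := by
  induction k generalizing a with
  | zero => simp
  | succ n ih =>
    simp only [List.replicate_succ, List.foldl_cons, astep, BEq.rfl, if_true]
    rw [ih]
    norm_num
    ring

theorem foldl_bstep_replicate (x : Int) (k : Nat) (a b : Int) :
    (List.replicate k x).foldl bstep (x, a, b) = (x, a + (k : Int), b) := by
  rw [← astep_eq_bstep]; exact foldl_astep_replicate x k a b

-- the min-component of the fold is "min with the initial value": min can be pulled out
theorem foldl_bstep_min (ys : List Int) (p a b c : Int) :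
    ys.foldl bstep (p, a, min b c) =
      ((ys.foldl bstep (p, a, b)).1, (ys.foldl bstep (p, a, b)).2.1,
        min (ys.foldl bstep (p, a, b)).2.2 c) := by
  induction ys generalizing p a b with
  | nil => simp
  | cons y ys ih =>
    simp only [List.foldl_cons, bstep]
    split
    · exact ih y (a + 1) b
    · rw [show min (min b c) a = min (min b a) c by omega]
      exact ih y 1 (min b a)

-- the first component of the fold is the last scanned element (or the initial prev)
theorem foldl_bstep_fst (ys : List Int) (p a b : Int) :
    (ys.foldl bstep (p, a, b)).1 = ys.getLastD p := by
  induction ys generalizing p a b with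
  | nil => rfl
  | cons y ys ih =>
    rw [List.getLastD_cons]
    simp only [List.foldl_cons, bstep]
    split
    · exact ih y (a + 1) b
    · exact ih y 1 (min b a)

theorem getLast_block (x r : Int) (rt : List Int) (i j : Nat)
    (hrlast : (r :: rt).getLast? = some x) :
    (List.replicate i x ++ ((r :: rt) ++ List.replicate j x)).getLast? = some x := by
  rw [List.getLast?_append, List.getLast?_append]
  cases j with
  | zero => simp [hrlast]
  | succ m => simp [List.getLast?_replicate]

-- the rotation loop moves the leading run of x to the back
theorem rotA_spec (i : Nat) :
    ∀ (fuel j : Nat) (x r : Int) (rt : List Int),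
      i ≤ fuel → (r :: rt).getLast? = some x → r ≠ x →
      rotA fuel (List.replicate i x ++ ((r :: rt) ++ List.replicate j x)) =
        (r :: rt) ++ List.replicate (j + i) x := by
  induction i with
  | zero =>
    intro fuel j x r rt _ hrlast hr
    simp only [List.replicate_zero, List.nil_append, Nat.add_zero]
    cases fuel with
    | zero => rfl
    | succ k =>
      have hlast : ((r :: rt) ++ List.replicate j x).getLast? = some x := by
        have := getLast_block x r rt 0 j hrlast
        simpa using this
      have hcond : ¬(((r :: (rt ++ List.replicate j x))).getLastD 0 == r) = true := by
        rw [List.getLastD_eq_getLast?,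
          show (r :: (rt ++ List.replicate j x)) = (r :: rt) ++ List.replicate j x by simp,
          hlast]
        simpa using Ne.symm hr
      show rotA (k + 1) (r :: (rt ++ List.replicate j x)) = _
      simp only [rotA]
      rw [if_neg hcond]
      simp
  | succ n ih =>
    intro fuel j x r rt hfuel hrlast hr
    cases fuel with
    | zero => omega
    | succ k =>
      have hlast : (x :: (List.replicate n x ++ (r :: (rt ++ List.replicate j x)))).getLast? = some x := by
        rw [show (x :: (List.replicate n x ++ (r :: (rt ++ List.replicate j x))))
            = List.replicate (n + 1) x ++ ((r :: rt) ++ List.replicate j x) by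
          simp [List.replicate_succ]]
        exact getLast_block x r rt (n + 1) j hrlast
      have hcond : (((x :: (List.replicate n x ++ (r :: (rt ++ List.replicate j x)))).getLastD 0 == x) = true) := by
        rw [List.getLastD_eq_getLast?, hlast]; simp
      simp only [List.replicate_succ, List.cons_append, rotA]
      rw [if_pos hcond]
      rw [show (List.replicate n x ++ (r :: (rt ++ List.replicate j x))) ++ [x]
          = List.replicate n x ++ ((r :: rt) ++ List.replicate (j + 1) x) by
        simp [List.replicate_succ']]
      rw [ih k (j + 1) x r rt (by omega) hrlast hr]
      rw [show j + 1 + n = j + (n + 1) by omega, List.cons_append]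

theorem main_eq (l : List Int) : evaluate_cycle_py l = evaluate_cycle_py_alt l := by
  cases l with
  | nil => rfl
  | cons x xs =>
    have hhead : (x :: xs).headD 0 = x := rfl
    by_cases hall : ∀ y ∈ x :: xs, y = x
    · -- uniform cycle: both sides return 0
      have hA : allEqA (x :: xs) = true := by
        simp only [allEqA, List.all_eq_true, beq_iff_eq]
        exact hall
      have hB : leadB ((x :: xs).headD 0) (x :: xs) = (x :: xs).length := by
        rw [List.headD_cons]
        exact (leadB_eq_length_iff x (x :: xs)).mpr hall
      simp only [evaluate_cycle_py, evaluate_cycle_py_alt]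
      rw [if_pos hA, if_pos hB]
    · -- non-uniform cycle
      have hA : allEqA (x :: xs) = false := by
        simp only [allEqA, List.all_eq_false]
        push_neg at hall
        obtain ⟨y, hy, hyx⟩ := hall
        exact ⟨y, hy, by simpa using hyx⟩
      set k := leadB x (x :: xs) with hk
      have hkne : k ≠ (x :: xs).length := by
        intro h
        exact hall ((leadB_eq_length_iff x (x :: xs)).mp (by rw [← hk]; exact h))
      have hkle : k ≤ (x :: xs).length := by rw [hk]; exact leadB_le x (x :: xs)
      have hklt : k < (x :: xs).length := lt_of_le_of_ne hkle hkne
      have hk1 : 1 ≤ k := by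
        rw [hk]
        simp only [leadB, BEq.rfl, if_true]
        omega
      obtain ⟨r, rt, hdrop, hrx⟩ : ∃ r rt, (x :: xs).drop k = r :: rt ∧ r ≠ x := by
        rcases drop_leadB x (x :: xs) with h | h
        · exfalso
          have := congrArg List.length h
          simp only [List.length_drop, List.length_nil] at this
          rw [← hk] at this
          omega
        · rw [← hk] at h
          exact h
      have hsplit : x :: xs = List.replicate k x ++ (r :: rt) := by
        conv_lhs => rw [← List.take_append_drop k (x :: xs)]
        rw [hk, take_leadB, ← hk, hdrop]
      have hgetk : (x :: xs).getD k 0 = r := by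
        rw [hsplit, List.getD_eq_getElem?_getD, List.getElem?_append_right (by simp)]
        simp
      have hdrop1 : (x :: xs).drop (k + 1) = rt := by
        have h2 := congrArg (List.drop 1) hdrop
        rw [List.drop_drop] at h2
        simpa [Nat.add_comm] using h2
      obtain ⟨v, hv⟩ : ∃ v, (r :: rt).getLast? = some v := by
        cases h : (r :: rt).getLast? with
        | some w => exact ⟨w, rfl⟩
        | none => simp at h
      have hlgetD : (x :: xs).getLastD 0 = v := by
        rw [hsplit, List.getLastD_eq_getLast?, List.getLast?_append, hv]
        rfl
      simp only [evaluate_cycle_py, evaluate_cycle_py_alt, hhead, ← hk]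
      rw [if_neg (by simp [hA]), if_neg hkne]
      rcases hS : rt.foldl bstep (r, 1, (((x :: xs).length : Nat) : Int)) with ⟨p, a, b⟩
      by_cases hvx : v = x
      · -- last element equals the first: A rotates the leading run to the back;
        -- B merges the last run into the leading run arithmetically
        have h0 := rotA_spec k (x :: xs).length 0 x r rt (le_of_lt hklt) (by rw [hv, hvx]) hrx
        rw [List.replicate_zero, List.append_nil, Nat.zero_add, ← hsplit] at h0
        rw [h0, List.cons_append, List.tail_cons, List.headD_cons]
        rw [show (r :: (rt ++ List.replicate k x)).length = (x :: xs).length by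
          have := congrArg List.length hsplit
          simp only [List.length_cons, List.length_append, List.length_replicate] at this ⊢
          omega]
        rw [astep_eq_bstep, List.foldl_append, hS]
        have hp : p = x := by
          have h1 := foldl_bstep_fst rt r 1 (((x :: xs).length : Nat) : Int)
          rw [hS] at h1
          have h2 : rt.getLastD r = v := by
            have h3 : (r :: rt).getLastD 0 = v := by
              rw [List.getLastD_eq_getLast?, hv]; rfl
            rwa [List.getLastD_cons] at h3
          simp only at h1
          rw [h1, h2, hvx]
        rw [hp, foldl_bstep_replicate, hdrop1, hgetk, hS]
        rw [if_pos (show (((x :: xs).getLastD 0 == x) = true) by rw [hlgetD, hvx]; simp)]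
        show (if b > a + (k : Int) then a + (k : Int) else b) = min b (a + (k : Int))
        split <;> omega
      · -- last element differs from the first: A does not rotate at all
        have hcond : ¬(((x :: xs).getLastD 0 == x) = true) := by
          rw [hlgetD]
          simpa using hvx
        have hrot : rotA (x :: xs).length (x :: xs) = x :: xs := by
          rw [List.length_cons]
          simp only [rotA]
          rw [if_neg hcond]
        rw [hrot, List.tail_cons, List.headD_cons]
        obtain ⟨k', hk'⟩ : ∃ k', k = k' + 1 := ⟨k - 1, by omega⟩
        have hxs : xs = List.replicate k' x ++ (r :: rt) := by
          have h2 := hsplit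
          rw [hk', List.replicate_succ, List.cons_append] at h2
          simp only [List.cons.injEq] at h2
          exact h2.2
        have hfoldA : ∀ m : Int, (k : Int) < m →
            xs.foldl astep (x, 1, m) = rt.foldl astep (r, 1, (k : Int)) := by
          intro m hm
          rw [hxs, List.foldl_append, foldl_astep_replicate, List.foldl_cons]
          congr 1
          simp only [astep, if_neg (show ¬((r == x) = true) by simpa using hrx)]
          have h2 : (k : Int) = (k' : Int) + 1 := by exact_mod_cast hk'
          simp only [Prod.mk.injEq]
          refine ⟨trivial, trivial, ?_⟩
          split <;> omega
        rw [hfoldA (((x :: xs).length : Nat) : Int) (by exact_mod_cast hklt)]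
        have hmin : rt.foldl bstep (r, 1, (k : Int))
            = ((rt.foldl bstep (r, 1, (((x :: xs).length : Nat) : Int))).1,
               (rt.foldl bstep (r, 1, (((x :: xs).length : Nat) : Int))).2.1,
               min (rt.foldl bstep (r, 1, (((x :: xs).length : Nat) : Int))).2.2 (k : Int)) := by
          rw [← foldl_bstep_min]
          have h2 : (k : Int) ≤ (((x :: xs).length : Nat) : Int) := by exact_mod_cast hkle
          rw [show min (((x :: xs).length : Nat) : Int) (k : Int) = (k : Int) by omega]
        rw [astep_eq_bstep, hmin, hS, hdrop1, hgetk, hS]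
        rw [if_neg hcond]
        show (if min b (k : Int) > a then a else min b (k : Int)) = min (min b a) (k : Int)
        split <;> omega

-- ===== VERDICT (by name: the statement is the Claim_ definition above) =====
theorem evaluate_cycle_py_spec : Claim_equal_evaluate_cycle_py := by
  intro l _
  unfold Spec_evaluate_cycle_py
  exact main_eq l
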